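-- pv_equiv track=rewrite | github.com/emy3210/eps-mac110 | ep12.py | pontuacao
-- ===== SOURCE A (Python) =====
-- DNA = 'ATCG'
--
-- def pontuacao(m, d, g, s, t):
--     ''' (int, int, int str, str) -> int
--     RECEBE 3 inteiros não negativos `m`, `d`, e `g` e duas strings `s` e `t`
--     de mesmo tamanho com zero ou mais gaps representando fitas de DNA.
--
--     RETORNA a pontuação do alinhamento entre `s` e `t` calculada da seguinte
--     forma:
--
--        * duas letras iguais alinhadas contam m pontos,
--        * duas letras diferentes alinhadas contam −d pontos (subtrai d pontos) e
--        * uma letra alinhada com um gap ou dois gaps alinhados contam −g pontos.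
--
--     Exemplos:
--     In  [1]: pontuacao(5, 5, 3, 'T_CGTAC', 'ATCG___')
--     Out [1]: -7
--
--     In  [2]: pontuacao(1, 5, 3, 'T_CGTAC', 'ATCG___')
--     Out [2]: -15
--
--     In  [3]: pontuacao(5, 5, 3, 'T_CGTA', 'ATCG__')
--     Out [3]: -4
--     '''
--     # modifique o código abaixo para conter a sua solução.
--     x=len(s)
--     soma=0
--     for i in range(x):
--         fita_s=s[i]
--         fita_t=t[i]
--         if fita_s in DNA and fita_t in DNA:
--             if fita_s==fita_t:
--                 soma+=m
--             else:
--                 soma-=d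
--         else:
--             soma-=g
--
--     return soma
-- ===== SOURCE B (Python) =====
-- DNA = 'ATCG'
--
-- def pontuacao(m, d, g, s, t):
--     pairs = list(zip(s, t))
--     gaps = sum(1 for a, b in pairs if not (a in DNA and b in DNA))
--     matches = sum(1 for a, b in pairs if a in DNA and b in DNA and a == b)
--     mismatches = len(pairs) - gaps - matches
--     return m * matches - d * mismatches - g * gaps
-- ===== Notes on version B (the rewrite author's own statement) =====
-- stated objective: alternative
-- what changed: B replaces A's element-wise running-sum loop over indices by counting the three pair categories (matches, mismatches, gaps) over zip(s,t) and returning the closed form m*matches - d*mismatches - g*gaps.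
import Mathlib
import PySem

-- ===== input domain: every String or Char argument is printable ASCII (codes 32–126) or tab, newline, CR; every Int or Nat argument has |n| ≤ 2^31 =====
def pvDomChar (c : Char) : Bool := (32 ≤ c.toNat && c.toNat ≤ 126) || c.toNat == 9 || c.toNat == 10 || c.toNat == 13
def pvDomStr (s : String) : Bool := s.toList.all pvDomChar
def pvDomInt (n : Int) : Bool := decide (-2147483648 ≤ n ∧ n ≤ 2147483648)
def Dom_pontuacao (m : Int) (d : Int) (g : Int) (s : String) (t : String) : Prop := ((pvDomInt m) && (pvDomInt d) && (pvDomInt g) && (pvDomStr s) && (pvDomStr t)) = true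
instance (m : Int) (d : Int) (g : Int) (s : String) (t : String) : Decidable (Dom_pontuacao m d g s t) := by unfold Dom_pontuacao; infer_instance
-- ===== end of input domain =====

-- B replaces A's element-wise running-sum loop by three category counts over the
-- zipped pairs and the closed form m*matches - d*mismatches - g*gaps (objective: alternative).

-- the module constant DNA = 'ATCG'; a single character `c in DNA` is exactly
-- list membership of the character in the string's characters
def pvDNA : List Char := "ATCG".toList

-- ===== PORT A =====
-- literal port of A's index loop; t[i] out of range (IndexError in Python) is
-- excluded by Pre_pontuacao, the pyGetD default is never read under it
def pontuacao (m : Int) (d : Int) (g : Int) (s : String) (t : String) : Int :=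
  let x := PySem.Str.len s
  (PySem.List.pyRange 0 x 1).foldl (fun soma i =>
    let fita_s := PySem.List.pyGetD s.toList i ' '
    let fita_t := PySem.List.pyGetD t.toList i ' '
    if fita_s ∈ pvDNA ∧ fita_t ∈ pvDNA then
      if fita_s = fita_t then soma + m else soma - d
    else soma - g) 0

-- ===== PORT B =====
def pontuacao_alt (m : Int) (d : Int) (g : Int) (s : String) (t : String) : Int :=
  let pairs := s.toList.zip t.toList
  let gaps : Int := pairs.countP (fun p => !(decide (p.1 ∈ pvDNA) && decide (p.2 ∈ pvDNA)))
  let matchesCnt : Int := pairs.countP (fun p => decide (p.1 ∈ pvDNA) && decide (p.2 ∈ pvDNA) && decide (p.1 = p.2))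
  let mismatches : Int := (pairs.length : Int) - gaps - matchesCnt
  m * matchesCnt - d * mismatches - g * gaps

-- ===== PRECONDITION & SPEC =====
-- Pre_ excludes len(t) < len(s), where A raises IndexError on t[i]
def Pre_pontuacao (m : Int) (d : Int) (g : Int) (s : String) (t : String) : Prop :=
  s.toList.length ≤ t.toList.length
instance (m : Int) (d : Int) (g : Int) (s : String) (t : String) : Decidable (Pre_pontuacao m d g s t) := by unfold Pre_pontuacao; infer_instance
def pvWitness_pontuacao : Int × Int × Int × String × String := (5, 5, 3, "T_CGTAC", "ATCG___")

def Spec_pontuacao (m : Int) (d : Int) (g : Int) (s : String) (t : String) (out : Int) : Prop := out = pontuacao_alt m d g s t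
instance (m : Int) (d : Int) (g : Int) (s : String) (t : String) (out : Int) : Decidable (Spec_pontuacao m d g s t out) := by unfold Spec_pontuacao; infer_instance

-- ===== CLAIM (what is proved, stated in full; the proofs are below) =====
def Claim_equal_pontuacao : Prop := ∀ (m : Int) (d : Int) (g : Int) (s : String) (t : String), Dom_pontuacao m d g s t → Pre_pontuacao m d g s t → Spec_pontuacao m d g s t (pontuacao m d g s t)
-- ===== LEMMAS AND PROOFS =====

-- closed form of the zipped fold: the running sum is the category-count formula
theorem pv_foldl_counts (m d g : Int) (zs : List (Char × Char)) (acc : Int) :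
    zs.foldl (fun soma p =>
      if p.1 ∈ pvDNA ∧ p.2 ∈ pvDNA then
        if p.1 = p.2 then soma + m else soma - d
      else soma - g) acc
    = acc + m * (zs.countP (fun p => decide (p.1 ∈ pvDNA) && decide (p.2 ∈ pvDNA) && decide (p.1 = p.2)) : Int)
        - d * ((zs.length : Int)
               - (zs.countP (fun p => !(decide (p.1 ∈ pvDNA) && decide (p.2 ∈ pvDNA))) : Int)
               - (zs.countP (fun p => decide (p.1 ∈ pvDNA) && decide (p.2 ∈ pvDNA) && decide (p.1 = p.2)) : Int))
        - g * (zs.countP (fun p => !(decide (p.1 ∈ pvDNA) && decide (p.2 ∈ pvDNA))) : Int) := by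
  induction zs generalizing acc with
  | nil => simp
  | cons p zs ih =>
    simp only [List.foldl_cons, List.countP_cons, List.length_cons, ih]
    by_cases h1 : p.1 ∈ pvDNA ∧ p.2 ∈ pvDNA
    · by_cases h2 : p.1 = p.2
      · simp [h1.2, h2]; ring
      · simp [h1.1, h1.2, h2]; ring
    · rw [if_neg h1]
      rcases Decidable.not_and_iff_not_or_not.mp h1 with h | h
      · simp [h]; ring
      · by_cases h1' : p.1 ∈ pvDNA
        · simp [h, h1']; ring
        · simp [h, h1']; ring

-- ===== VERDICT (by name: the statement is the Claim_ definition above) =====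
theorem pontuacao_spec : Claim_equal_pontuacao := by
  intro m d g s t _ hpre
  unfold Spec_pontuacao pontuacao pontuacao_alt
  unfold Pre_pontuacao at hpre
  have hz : (s.toList.zip t.toList).length = s.toList.length := by
    rw [List.length_zip]; omega
  have hstep : (PySem.List.pyRange 0 (PySem.Str.len s) 1).foldl (fun soma i =>
      let fita_s := PySem.List.pyGetD s.toList i ' '
      let fita_t := PySem.List.pyGetD t.toList i ' '
      if fita_s ∈ pvDNA ∧ fita_t ∈ pvDNA then
        if fita_s = fita_t then soma + m else soma - d
      else soma - g) 0
    = (PySem.List.pyRange 0 (((s.toList.zip t.toList).length : Nat) : Int) 1).foldl (fun soma i =>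
        (fun soma p =>
          if (p : Char × Char).1 ∈ pvDNA ∧ p.2 ∈ pvDNA then
            if p.1 = p.2 then soma + m else soma - d
          else soma - g) soma (PySem.List.pyGetD (s.toList.zip t.toList) i (' ', ' '))) 0 := by
    have hlen : PySem.Str.len s = (((s.toList.zip t.toList).length : Nat) : Int) := by
      rw [PySem.Str.len_eq, hz]
    rw [hlen]
    apply PySem.List.foldl_congr_mem
    intro acc i hi
    have hmem := PySem.List.mem_pyRange_one.mp hi
    obtain ⟨k, rfl⟩ : ∃ k : Nat, i = (k : Int) :=
      ⟨i.toNat, (Int.toNat_of_nonneg hmem.1).symm⟩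
    have hkz : k < (s.toList.zip t.toList).length := by exact_mod_cast hmem.2
    have hkc : k < s.toList.length := by omega
    have hkd : k < t.toList.length := by omega
    simp only [PySem.List.pyGetD_natCast]
    rw [List.getD_eq_getElem _ _ hkz, List.getD_eq_getElem _ _ hkc,
        List.getD_eq_getElem _ _ hkd]
    rw [List.getElem_zip]
  rw [hstep, PySem.List.foldl_pyRange_zero_pyGetD' (s.toList.zip t.toList) (' ', ' ')
        (fun soma p =>
          if (p : Char × Char).1 ∈ pvDNA ∧ p.2 ∈ pvDNA then
            if p.1 = p.2 then soma + m else soma - d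
          else soma - g) 0,
      pv_foldl_counts]
  dsimp only
  ring
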